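-- pv_equiv track=rewrite | github.com/LuisangelE-04/TIP102 | Unit-2/Session-1/Standard-Set-1/6. performances-with-max-audience.py | max_audience_performances
-- ===== SOURCE A (Python) =====
-- def max_audience_performances(audiences):
--   '''
--   Understand: Return max audience size in list. If multiple max add and combine.
--   Retrieve max by getting each index into a dictionary with the value of the audience using enumerate.
--   for index, audience in enumerate(audience): my_dict[index] = audience
--   '''
--   '''
--   return sum(audience for audience in audiences if audience == max(audiences))
--   '''
--   frequency_map = {}
--
--   for audience in audiences:
--     frequency_map[audience] = frequency_map.get(audience, 0) + 1
--
--   max_audience = max(frequency_map.keys())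
--
--   return max_audience * frequency_map[max_audience]
-- ===== SOURCE B (Python) =====
-- def max_audience_performances(audiences):
--   best = None
--   count = 0
--   for audience in audiences:
--     if best is None or audience > best:
--       best = audience
--       count = 1
--     elif audience == best:
--       count += 1
--   if best is None:
--     raise ValueError("max() arg is an empty sequence")
--   return best * count
-- ===== Notes on version B (the rewrite author's own statement) =====
-- stated objective: simpler
-- what changed: Replaces the frequency dictionary plus max-over-keys with a single pass maintaining only a running maximum and its occurrence count.
import Mathlib
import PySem

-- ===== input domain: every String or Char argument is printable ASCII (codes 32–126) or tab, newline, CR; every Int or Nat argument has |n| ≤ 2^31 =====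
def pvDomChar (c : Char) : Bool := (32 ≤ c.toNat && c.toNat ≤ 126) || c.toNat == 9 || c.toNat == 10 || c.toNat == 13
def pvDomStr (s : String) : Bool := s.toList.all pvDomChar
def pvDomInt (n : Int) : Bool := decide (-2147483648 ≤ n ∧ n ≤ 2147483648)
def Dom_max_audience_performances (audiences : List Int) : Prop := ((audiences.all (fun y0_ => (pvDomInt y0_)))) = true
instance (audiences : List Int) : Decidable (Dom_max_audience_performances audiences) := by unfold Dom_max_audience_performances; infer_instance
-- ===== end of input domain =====

-- B replaces A's frequency dictionary + max-over-keys with a single pass keeping a running maximum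
-- and its occurrence count (objective: simpler). Both raise ValueError on the empty list (excluded by Pre_).


-- ===== PORT A =====
def max_audience_performances (audiences : List Int) : Int :=
  -- frequency_map = {}; for audience in audiences: frequency_map[audience] = frequency_map.get(audience, 0) + 1
  let d := audiences.foldl (fun d a => d.insert a (d.getD a 0 + 1)) (PySem.Dict.empty : PySem.Dict Int Int)
  -- max_audience = max(frequency_map.keys())   (ValueError on empty: excluded by Pre_)
  match PySem.List.max? d.keys (fun k => k) with
  | some m =>
      -- frequency_map[max_audience]  (KeyError branch unreachable: m is a key)
      match d.get? m with
      | some c => m * c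
      | none => 0
  | none => 0

-- ===== PORT B =====
-- one loop step: keep the running best and its count
def pvStepB (st : Option Int × Int) (a : Int) : Option Int × Int :=
  match st.1 with
  | none => (some a, 1)
  | some b => if a > b then (some a, 1) else if a = b then (some b, st.2 + 1) else st

def max_audience_performances_alt (audiences : List Int) : Int :=
  let st := audiences.foldl pvStepB (none, 0)
  match st.1 with
  | some b => b * st.2
  | none => 0   -- Python B raises ValueError here; excluded by Pre_

-- ===== PRECONDITION & SPEC =====
-- A (and B) raise ValueError (max of an empty sequence) on the empty list.
def Pre_max_audience_performances (audiences : List Int) : Prop := audiences ≠ []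
instance (audiences : List Int) : Decidable (Pre_max_audience_performances audiences) := by unfold Pre_max_audience_performances; infer_instance
def pvWitness_max_audience_performances : List Int := [3, 7, 7, 2]

def Spec_max_audience_performances (audiences : List Int) (out : Int) : Prop := out = max_audience_performances_alt audiences
instance (audiences : List Int) (out : Int) : Decidable (Spec_max_audience_performances audiences out) := by unfold Spec_max_audience_performances; infer_instance

-- ===== CLAIM (what is proved, stated in full; the proofs are below) =====
def Claim_equal_max_audience_performances : Prop := ∀ (audiences : List Int), Dom_max_audience_performances audiences → Pre_max_audience_performances audiences → Spec_max_audience_performances audiences (max_audience_performances audiences)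

-- ===== LEMMAS AND PROOFS =====

-- B's loop computes the running max and its count among the elements seen so far
theorem pvLoopB (t : List Int) (b c : Int) :
    t.foldl pvStepB (some b, c) =
      (some (t.foldl max b),
        (if t.foldl max b = b then c else 0) + (t.count (t.foldl max b) : Int)) := by
  induction t generalizing b c with
  | nil => simp
  | cons y t ih =>
    simp only [List.foldl_cons]
    by_cases hgt : y > b
    · have hstep : pvStepB (some b, c) y = (some y, 1) := by
        simp [pvStepB, hgt]
      have hmax : max b y = y := by omega
      have hM := (PySem.List.le_foldl_max t y).1
      have hMb : t.foldl max y ≠ b := by omega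
      rw [hstep, ih]
      simp only [hmax, if_neg hMb, List.count_cons]
      by_cases hMy : t.foldl max y = y <;> simp [hMy] <;> omega
    · by_cases heq : y = b
      · have hstep : pvStepB (some b, c) y = (some b, c + 1) := by
          simp [pvStepB, heq]
        have hmax : max b y = b := by omega
        rw [hstep, ih]
        subst heq
        simp only [hmax, List.count_cons]
        by_cases hMy : t.foldl max y = y <;> simp [hMy] <;> omega
      · have hstep : pvStepB (some b, c) y = (some b, c) := by
          simp [pvStepB, hgt, heq]
        have hmax : max b y = b := by omega
        have hM := (PySem.List.le_foldl_max t b).1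
        have hMy : t.foldl max b ≠ y := by omega
        rw [hstep, ih]
        simp only [hmax, List.count_cons]
        simp [Ne.symm hMy]

-- the max over the deduplicated keys equals the running max over the list
theorem pvMaxSet (x : Int) (t : List Int) :
    PySem.List.max? (PySem.Set.ofList (x :: t)) (fun k => k) = some (t.foldl max x) := by
  have hmem : x ∈ PySem.Set.ofList (x :: t) := by
    rw [PySem.Set.mem_ofList]; exact List.mem_cons_self
  have hne : PySem.Set.ofList (x :: t) ≠ [] := by
    intro h; rw [h] at hmem; exact absurd hmem (List.not_mem_nil)
  obtain ⟨m, hm⟩ : ∃ m, PySem.List.max? (PySem.Set.ofList (x :: t)) (fun k => k) = some m := by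
    cases hmq : PySem.List.max? (PySem.Set.ofList (x :: t)) (fun k => k) with
    | none => exact absurd ((PySem.List.max?_eq_none_iff _ _).mp hmq) hne
    | some m => exact ⟨m, rfl⟩
  rw [hm]
  have hmmem : m ∈ (x :: t) := by
    have := PySem.List.max?_mem hm
    rwa [PySem.Set.mem_ofList] at this
  have hub := PySem.List.max?_isMax hm
  have hMle := PySem.List.le_foldl_max t x
  have hMmem : t.foldl max x ∈ (x :: t) := by
    rcases PySem.List.foldl_max_mem t x with h | h
    · rw [h]; exact List.mem_cons_self
    · exact List.mem_cons_of_mem _ h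
  have h1 : m ≤ t.foldl max x := by
    rcases List.mem_cons.mp hmmem with h | h
    · rw [h]; exact hMle.1
    · exact hMle.2 m h
  have h2 : t.foldl max x ≤ m := by
    have := hub (t.foldl max x) (by rw [PySem.Set.mem_ofList]; exact hMmem)
    simpa using this
  have : m = t.foldl max x := le_antisymm h1 h2
  rw [this]

-- ===== VERDICT (by name: the statement is the Claim_ definition above) =====
theorem max_audience_performances_spec : Claim_equal_max_audience_performances := by
  intro audiences _ hpre
  unfold Spec_max_audience_performances
  cases audiences with
  | nil => exact absurd rfl hpre
  | cons x t =>
    unfold max_audience_performances max_audience_performances_alt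
    simp only
    rw [PySem.Dict.foldl_insert_getD_add_one_eq_counter, PySem.Dict.keys_counter, pvMaxSet]
    rw [List.foldl_cons, show pvStepB (none, 0) x = (some x, 1) from rfl, pvLoopB]
    set M := t.foldl max x with hMdef
    -- A side: get? M on the counter
    have hMmem : M ∈ (x :: t) := by
      rcases PySem.List.foldl_max_mem t x with h | h
      · rw [hMdef, h]; exact List.mem_cons_self
      · exact List.mem_cons_of_mem _ h
    have hkeys : M ∈ (PySem.Dict.counter (x :: t)).keys := by
      rw [PySem.Dict.keys_counter, PySem.Set.mem_ofList]; exact hMmem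
    have hget : (PySem.Dict.counter (x :: t)).get? M = some (((x :: t).count M : Int)) := by
      cases hq : (PySem.Dict.counter (x :: t)).get? M with
      | none => exact absurd hkeys ((PySem.Dict.get?_eq_none_iff_not_mem_keys _ _).mp hq)
      | some c =>
        have := PySem.Dict.getD_counter (xs := (x :: t)) (v := M)
        rw [PySem.Dict.getD_eq_get?_getD, hq] at this
        simp at this
        rw [this]
    simp only [hget]
    show M * (((x :: t).count M : Nat) : Int) = M * ((if M = x then 1 else 0) + (t.count M : Int))
    rw [List.count_cons]
    push_cast
    by_cases h : M = x <;> simp [h] <;> exact Or.inl (by omega)
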